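-- pv_equiv track=rewrite | github.com/Dulet/aoc2018 | day2.py | first_difference
-- ===== SOURCE A (Python) =====
-- def first_difference(str1, str2):
--     # finds which letters are different in two strings
--     f = -1
--     for a, b in zip(str1, str2):
--         f += 1
--         if a != b:
--             str1 = str1[:f] + str1[(f+1):] + "1"  # adds indicator how many letters are different
--             str2 = str2[:f] + str2[(f+1):] + "1"
--             f = 0
--     if str1.count("1") == 1: # if indicator happens once, we return that string
--         str1 = str1.replace("1", "")
--         return str1
-- ===== SOURCE B (Python) =====
-- def first_difference(str1, str2):
--     # One O(n) pass: collect mismatch positions; exactly one -> common letters.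
--     diffs = [i for i, (a, b) in enumerate(zip(str1, str2)) if a != b]
--     if len(diffs) == 1:
--         i = diffs[0]
--         return str1[:i] + str1[i + 1:]
--     return None
-- ===== Notes on version B (the rewrite author's own statement) =====
-- stated objective: faster
-- what changed: B collects the mismatch positions in one read-only pass and returns str1 without the single mismatching char, instead of A's per-mismatch rebuilding of both strings by four slices with appended '1' sentinel markers and a resetting offset counter.
-- intended difference: On inputs where str1 itself contains the sentinel character '1' outside the unique mismatch (A's in-band marker miscounts: A returns None on a genuine one-difference pair, or strips a literal '1' and returns a string when the strings do not differ in exactly one place), and on pairs mismatching exactly at positions 0 and len(str1)-1 with no '1' in str1[1:] (A's reset offset deletes its own marker and A wrongly returns str1[1:]), B returns the intended value: str1 minus the mismatching char iff the strings differ in exactly one zipped position, else None. — e.g. on first_difference("1", "1"): A returns some "", B returns none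
import Mathlib
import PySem

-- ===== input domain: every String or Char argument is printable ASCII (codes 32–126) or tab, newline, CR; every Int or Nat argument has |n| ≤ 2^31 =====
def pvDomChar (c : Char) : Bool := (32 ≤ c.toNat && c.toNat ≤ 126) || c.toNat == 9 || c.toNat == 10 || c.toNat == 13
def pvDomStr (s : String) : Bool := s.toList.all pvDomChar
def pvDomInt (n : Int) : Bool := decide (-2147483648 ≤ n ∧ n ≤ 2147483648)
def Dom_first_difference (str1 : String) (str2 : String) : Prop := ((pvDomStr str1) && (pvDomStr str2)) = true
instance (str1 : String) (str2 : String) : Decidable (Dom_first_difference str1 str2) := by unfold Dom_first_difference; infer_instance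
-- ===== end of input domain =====

-- B replaces A's per-mismatch sentinel-marker string rebuilding by one pass collecting
-- the mismatch positions (objective: faster, measured); outside D_
-- below the two agree, inside D_ B returns the intended 'common letters iff exactly one
-- difference' value.

-- ===== PORT A =====
-- s[:f] + s[(f+1):] + "1"
def pvDelOp (s : List Char) (f : Int) : List Char :=
  PySem.List.slice s none (some f) ++ PySem.List.slice s (some (f + 1)) none ++ ['1']

-- one iteration of A's loop over zip(str1, str2); state = (str1, str2, f)
def pvStepA (st : List Char × List Char × Int) (ab : Char × Char) : List Char × List Char × Int :=
  let f := st.2.2 + 1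
  if ab.1 ≠ ab.2 then (pvDelOp st.1 f, pvDelOp st.2.1 f, 0)
  else (st.1, st.2.1, f)

def first_difference (str1 : String) (str2 : String) : Option String :=
  let fin := (str1.toList.zip str2.toList).foldl pvStepA (str1.toList, str2.toList, -1)
  if PySem.Chars.count fin.1 ['1'] = 1 then
    some (String.ofList (PySem.Chars.replace fin.1 ['1'] []))
  else none

-- ===== PORT B =====
-- diffs[0] is ported as headD 0, total because the branch guarantees length 1
def first_difference_alt (str1 : String) (str2 : String) : Option String :=
  let diffs := ((PySem.List.enumerate (str1.toList.zip str2.toList) 0).filter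
    (fun p => p.2.1 ≠ p.2.2)).map Prod.fst
  if diffs.length = 1 then
    let i := diffs.headD 0
    some (String.ofList (PySem.List.slice str1.toList none (some i) ++
      PySem.List.slice str1.toList (some (i + 1)) none))
  else none

-- ===== PRECONDITION & SPEC =====
-- the first (at most) f positions below min(len1,len2) where the strings disagree,
-- counting from k; the scan stops as soon as f mismatches have been found
def pvMis3 : Nat → Nat → List Char → List Char → List Nat
  | _, 0, _, _ => []
  | k, f + 1, a :: t1, b :: t2 =>
      if a = b then pvMis3 (k + 1) (f + 1) t1 t2 else k :: pvMis3 (k + 1) f t1 t2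
  | _, _, _, _ => []

-- On inputs where str1 contains the sentinel '1' outside the unique mismatch, or where the
-- strings mismatch exactly at positions 0 and len(str1)-1 with no '1' in str1[1:], A's
-- in-band '1' markers miscount (A returns None on a genuine one-difference pair, or a
-- stripped string when the difference count is not one); B returns the intended value:
-- str1 minus the mismatching char iff exactly one zipped position differs, else None.
def D_first_difference (str1 : String) (str2 : String) : Prop :=
  let M := pvMis3 0 3 str1.toList str2.toList
  (M = [] ∧ str1.toList.count '1' = 1)
  ∨ (M.length = 1 ∧ 1 ≤ (str1.toList.eraseIdx (M.headD 0)).count '1')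
  ∨ (M.length = 2 ∧ M.headD 0 = 0 ∧ str1.toList.drop (M.getD 1 0 + 1) = []
      ∧ (str1.toList.drop 1).count '1' = 0)
instance (str1 : String) (str2 : String) : Decidable (D_first_difference str1 str2) := by
  unfold D_first_difference; infer_instance

def Spec_first_difference (str1 : String) (str2 : String) (out : Option String) : Prop :=
  ¬ D_first_difference str1 str2 → out = first_difference_alt str1 str2
instance (str1 : String) (str2 : String) (out : Option String) :
    Decidable (Spec_first_difference str1 str2 out) := by
  unfold Spec_first_difference; infer_instance

def pvDiffWitness_first_difference : String × String := ("1", "1")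
def pvDiffWitnessOut_first_difference : (Option String) × (Option String) := (some "", none)

-- ===== CLAIM (what is proved, stated in full; the proofs are below) =====
def Claim_unchanged_first_difference : Prop := ∀ (str1 : String) (str2 : String), Dom_first_difference str1 str2 → Spec_first_difference str1 str2 (first_difference str1 str2)
def Claim_changed_first_difference : Prop := Dom_first_difference (pvDiffWitness_first_difference.1) (pvDiffWitness_first_difference.2) ∧ D_first_difference (pvDiffWitness_first_difference.1) (pvDiffWitness_first_difference.2) ∧ first_difference (pvDiffWitness_first_difference.1) (pvDiffWitness_first_difference.2) = pvDiffWitnessOut_first_difference.1 ∧ first_difference_alt (pvDiffWitness_first_difference.1) (pvDiffWitness_first_difference.2) = pvDiffWitnessOut_first_difference.2 ∧ pvDiffWitnessOut_first_difference.1 ≠ pvDiffWitnessOut_first_difference.2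
def Claim_exact_first_difference : Prop := ∀ (str1 : String) (str2 : String), Dom_first_difference str1 str2 → D_first_difference str1 str2 → first_difference str1 str2 ≠ first_difference_alt str1 str2

-- ===== LEMMAS AND PROOFS =====

-- reference form of A: one pass recording the per-mismatch deletion offsets (phase 1),
-- then the offsets replayed as guarded pops with the markers as a counter (phase 2);
-- proof-internal only (pvA_eq_ref below proves first_difference = pvRef)
def pvStepB1 (st : Option Int × List Int) (iab : Int × Char × Char) : Option Int × List Int :=
  if iab.2.1 ≠ iab.2.2 then
    (some iab.1, st.2 ++ [match st.1 with | none => iab.1 | some p => iab.1 - p])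
  else st

def pvStepB2 (st : List Char × Nat) (d : Int) : List Char × Nat :=
  if d < (st.1.length : Int) then (st.1.eraseIdx d.toNat, st.2 + 1) else st

def pvRef (str1 : String) (str2 : String) : Option String :=
  let ds := (PySem.List.enumerate (str1.toList.zip str2.toList) 0).foldl pvStepB1 (none, [])
  let fin := ds.2.foldl pvStepB2 (str1.toList, 0)
  if fin.1.count '1' + fin.2 = 1 then
    some (String.ofList (fin.1.filter (fun c => c ≠ '1')))
  else none

-- A's f value at the start of the iteration with enumerate-index j, given the last mismatch index
def pvFOf (j : Int) (p : Option Int) : Int :=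
  match p with | none => j - 1 | some q => j - 1 - q

-- A's string mutation replayed over a list of recorded offsets
def pvApplyA (s : List Char) (ds : List Int) : List Char := ds.foldl pvDelOp s

theorem pvB1_acc (l : List (Int × Char × Char)) (p : Option Int) (ds : List Int) :
    (l.foldl pvStepB1 (p, ds)).2 = ds ++ (l.foldl pvStepB1 (p, [])).2 ∧
    (l.foldl pvStepB1 (p, ds)).1 = (l.foldl pvStepB1 (p, [])).1 := by
  induction l generalizing p ds with
  | nil => simp
  | cons x t ih =>
    simp only [List.foldl_cons]
    by_cases hx : x.2.1 ≠ x.2.2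
    · simp only [pvStepB1, if_pos hx]
      obtain ⟨h1, h2⟩ := ih (some x.1) (ds ++ [match p with | none => x.1 | some q => x.1 - q])
      obtain ⟨h1', h2'⟩ := ih (some x.1) ([] ++ [match p with | none => x.1 | some q => x.1 - q])
      refine ⟨?_, by rw [h2, h2']⟩
      rw [h1, h1']
      simp
    · simp only [pvStepB1, if_neg hx]
      exact ih p ds

theorem pvLoop_eq (l : List (Char × Char)) : ∀ (j : Int) (p : Option Int) (ds : List Int)
    (s1 s2 : List Char),
    (l.foldl pvStepA (s1, s2, pvFOf j p)).1
      = pvApplyA s1 (((PySem.List.enumerate l j).foldl pvStepB1 (p, ds)).2.drop ds.length) := by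
  induction l with
  | nil =>
    intro j p ds s1 s2
    simp [PySem.List.enumerate_nil, pvApplyA]
  | cons x t ih =>
    intro j p ds s1 s2
    rw [PySem.List.enumerate_cons, List.foldl_cons, List.foldl_cons]
    by_cases hx : x.1 ≠ x.2
    · have hdnew : (match p with | none => j | some q => j - q) = pvFOf j p + 1 := by
        cases p <;> simp [pvFOf] <;> ring
      have hA : pvStepA (s1, s2, pvFOf j p) x
          = (pvDelOp s1 (pvFOf j p + 1), pvDelOp s2 (pvFOf j p + 1), pvFOf (j + 1) (some j)) := by
        simp [pvStepA, pvFOf, hx]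
      have hB : pvStepB1 (p, ds) (j, x) = (some j, ds ++ [pvFOf j p + 1]) := by
        simp [pvStepB1, hx, hdnew]
      rw [hA, hB]
      rw [ih (j + 1) (some j) (ds ++ [pvFOf j p + 1]) (pvDelOp s1 (pvFOf j p + 1))
        (pvDelOp s2 (pvFOf j p + 1))]
      obtain ⟨hacc, -⟩ := pvB1_acc (PySem.List.enumerate t (j + 1)) (some j)
        (ds ++ [pvFOf j p + 1])
      rw [hacc]
      rw [show ((ds ++ [pvFOf j p + 1]) ++
          ((PySem.List.enumerate t (j + 1)).foldl pvStepB1 (some j, [])).2)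
          = ds ++ ((pvFOf j p + 1) ::
          ((PySem.List.enumerate t (j + 1)).foldl pvStepB1 (some j, [])).2) by simp]
      rw [List.drop_left]
      rw [show (ds ++ (pvFOf j p + 1) ::
          ((PySem.List.enumerate t (j + 1)).foldl pvStepB1 (some j, [])).2)
          = ((ds ++ [pvFOf j p + 1]) ++
          ((PySem.List.enumerate t (j + 1)).foldl pvStepB1 (some j, [])).2) by simp]
      rw [List.drop_left]
      simp [pvApplyA]
    · have hf : pvFOf j p + 1 = pvFOf (j + 1) p := by
        cases p <;> simp [pvFOf] <;> ring
      have hA : pvStepA (s1, s2, pvFOf j p) x = (s1, s2, pvFOf (j + 1) p) := by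
        simp [pvStepA, hx, hf]
      have hB : pvStepB1 (p, ds) (j, x) = (p, ds) := by
        simp [pvStepB1, hx]
      rw [hA, hB]
      exact ih (j + 1) p ds s1 s2

theorem pvB1_bounds (l : List (Char × Char)) : ∀ (j : Int) (p : Option Int) (ds : List Int),
    0 ≤ j →
    (∀ d ∈ ds, 0 ≤ d ∧ d < j + l.length) →
    (∀ q, p = some q → 0 ≤ q ∧ q < j) →
    ∀ d ∈ ((PySem.List.enumerate l j).foldl pvStepB1 (p, ds)).2, 0 ≤ d ∧ d < j + l.length := by
  induction l with
  | nil =>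
    intro j p ds _ hds _
    simpa [PySem.List.enumerate_nil] using hds
  | cons x t ih =>
    intro j p ds hj hds hp
    rw [PySem.List.enumerate_cons, List.foldl_cons]
    have hlen : (j : Int) + (x :: t).length = (j + 1) + t.length := by
      push_cast [List.length_cons]; ring
    rw [hlen]
    by_cases hx : x.1 ≠ x.2
    · have hB : pvStepB1 (p, ds) (j, x) = (some j,
          ds ++ [match p with | none => j | some q => j - q]) := by
        simp [pvStepB1, hx]
      rw [hB]
      refine ih (j + 1) (some j) _ (by omega) ?_ ?_
      · intro d hd
        rcases List.mem_append.mp hd with hd | hd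
        · have := hds d hd; rw [hlen] at this; exact this
        · simp only [List.mem_singleton] at hd
          subst hd
          cases p with
          | none => simp; omega
          | some q =>
            obtain ⟨hq0, hq1⟩ := hp q rfl
            simp; omega
      · intro q hq
        injection hq with hq
        omega
    · have hB : pvStepB1 (p, ds) (j, x) = (p, ds) := by simp [pvStepB1, hx]
      rw [hB]
      refine ih (j + 1) p ds (by omega) ?_ ?_
      · intro d hd
        have := hds d hd; rw [hlen] at this
        exact ⟨(this).1, by omega⟩
      · intro q hq
        obtain ⟨hq0, hq1⟩ := hp q hq
        exact ⟨hq0, by omega⟩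

theorem pvDelOp_step (core : List Char) (m : Nat) (d : Int) (h0 : 0 ≤ d)
    (h1 : d < ((core.length + m : Nat) : Int)) :
    pvDelOp (core ++ List.replicate m '1') d
      = (pvStepB2 (core, m) d).1 ++ List.replicate (pvStepB2 (core, m) d).2 '1' ∧
    (pvStepB2 (core, m) d).1.length + (pvStepB2 (core, m) d).2 = core.length + m := by
  have ht : (d + 1).toNat = d.toNat + 1 := by omega
  by_cases hd : d < (core.length : Int)
  · have hdn : d.toNat < core.length := by omega
    constructor
    · simp only [pvStepB2, if_pos hd, pvDelOp]
      rw [PySem.List.slice_to _ h0, PySem.List.slice_from _ (by omega), ht]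
      rw [List.take_append_of_le_length (le_of_lt hdn),
        List.drop_append_of_le_length (by omega),
        List.eraseIdx_eq_take_drop_succ, List.replicate_succ']
      simp [List.append_assoc]
    · simp only [pvStepB2, if_pos hd]
      rw [List.length_eraseIdx]
      simp only [if_pos hdn]
      omega
  · have hk : core.length ≤ d.toNat := by omega
    have hkm : d.toNat - core.length < m := by omega
    constructor
    · simp only [pvStepB2, if_neg hd, pvDelOp]
      rw [PySem.List.slice_to _ h0, PySem.List.slice_from _ (by omega), ht]
      rw [List.take_append, List.drop_append, List.take_replicate, List.drop_replicate]
      rw [List.take_of_length_le hk, List.drop_eq_nil_of_le (by omega)]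
      rw [min_eq_left (by omega)]
      conv_rhs => rw [show m = (d.toNat - core.length) + ((m - (d.toNat + 1 - core.length)) + 1) by omega,
        List.replicate_add, List.replicate_add]
      simp only [List.append_assoc, List.replicate_one]
      simp
    · simp [pvStepB2, if_neg hd]

theorem pvPhase2 : ∀ (ds : List Int) (core : List Char) (m : Nat),
    (∀ d ∈ ds, 0 ≤ d ∧ d < ((core.length + m : Nat) : Int)) →
    pvApplyA (core ++ List.replicate m '1') ds
      = (ds.foldl pvStepB2 (core, m)).1 ++ List.replicate (ds.foldl pvStepB2 (core, m)).2 '1' := by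
  intro ds
  induction ds with
  | nil => intro core m _; simp [pvApplyA]
  | cons d ds ih =>
    intro core m h
    obtain ⟨h0, h1⟩ := h d (List.mem_cons_self)
    obtain ⟨hstep, hlen⟩ := pvDelOp_step core m d h0 h1
    simp only [pvApplyA, List.foldl_cons] at *
    rw [hstep]
    rw [ih (pvStepB2 (core, m) d).1 (pvStepB2 (core, m) d).2
      (by intro d' hd'; rw [hlen]; exact h d' (List.mem_cons_of_mem _ hd'))]

theorem pvCount_go (l : List Char) : ∀ (fuel : Nat) (acc : Nat), l.length ≤ fuel →
    PySem.Chars.count.go ['1'] fuel l acc = acc + l.count '1' := by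
  induction l with
  | nil =>
    intro fuel acc _
    cases fuel <;> simp [PySem.Chars.count.go]
  | cons c t ih =>
    intro fuel acc h
    cases fuel with
    | zero => simp at h
    | succ n =>
      by_cases hc : c = '1'
      · subst hc
        simp only [PySem.Chars.count.go, List.isPrefixOf, BEq.rfl, Bool.and_true, if_pos]
        rw [show (List.drop ['1'].length ('1' :: t)) = t by simp]
        rw [ih n (acc + 1) (by simpa using h)]
        simp [List.count_cons]
        omega
      · simp only [PySem.Chars.count.go]
        rw [if_neg (by simp [List.isPrefixOf, hc]; exact fun e => hc e.symm)]
        rw [ih n acc (by simpa using h)]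
        simp [List.count_cons, hc, Ne.symm hc]

theorem pvCount_one (s : List Char) : PySem.Chars.count s ['1'] = s.count '1' := by
  rw [PySem.Chars.count, if_neg (by simp)]
  simpa using pvCount_go s s.length 0 le_rfl

theorem pvReplace_go (l : List Char) : ∀ (fuel : Nat) (acc : List Char), l.length ≤ fuel →
    PySem.Chars.replace.go ['1'] [] fuel l acc = acc.reverse ++ l.filter (fun c => c ≠ '1') := by
  induction l with
  | nil =>
    intro fuel acc _
    cases fuel <;> simp [PySem.Chars.replace.go]
  | cons c t ih =>
    intro fuel acc h
    cases fuel with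
    | zero => simp at h
    | succ n =>
      by_cases hc : c = '1'
      · subst hc
        simp only [PySem.Chars.replace.go, List.isPrefixOf, BEq.rfl, Bool.and_true, if_pos]
        rw [show (List.drop ['1'].length ('1' :: t)) = t by simp]
        rw [ih n _ (by simpa using h)]
        simp
      · simp only [PySem.Chars.replace.go]
        rw [if_neg (by simp [List.isPrefixOf]; exact fun e => hc e.symm)]
        rw [ih n (c :: acc) (by simpa using h)]
        simp [hc]

theorem pvReplace_one (s : List Char) :
    PySem.Chars.replace s ['1'] [] = s.filter (fun c => c ≠ '1') := by
  rw [PySem.Chars.replace, if_neg (by simp)]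
  simpa using pvReplace_go s s.length [] le_rfl

theorem pvA_eq_ref (str1 str2 : String) : first_difference str1 str2 = pvRef str1 str2 := by
  unfold first_difference pvRef
  dsimp only
  have hloop := pvLoop_eq (str1.toList.zip str2.toList) 0 none []
    str1.toList str2.toList
  rw [show pvFOf 0 none = -1 by simp [pvFOf]] at hloop
  simp only [List.length_nil, List.drop_zero] at hloop
  rw [hloop]
  have hbound := pvB1_bounds (str1.toList.zip str2.toList) 0 none [] le_rfl
    (by simp) (by simp)
  have hzlen : (str1.toList.zip str2.toList).length ≤ str1.toList.length := by
    simp [List.length_zip]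
  have hphase := pvPhase2
    (((PySem.List.enumerate (str1.toList.zip str2.toList) 0).foldl pvStepB1 (none, [])).2)
    str1.toList 0
    (by
      intro d hd
      obtain ⟨h0, h1⟩ := hbound d hd
      refine ⟨h0, ?_⟩
      have : ((str1.toList.zip str2.toList).length : Int) ≤ (str1.toList.length : Int) := by
        exact_mod_cast hzlen
      simp only [Nat.add_zero]
      omega)
  simp only [List.replicate_zero, List.append_nil] at hphase
  rw [hphase]
  rw [pvCount_one, pvReplace_one]
  rw [List.count_append, List.count_replicate]
  rw [List.filter_append]
  simp

-- ===== new machinery: mismatch-list characterizations =====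

-- unbounded mismatch scan (proof-side reference for pvMis3)
def pvMisAux : Nat → List Char → List Char → List Nat
  | k, a :: t1, b :: t2 =>
      if a = b then pvMisAux (k + 1) t1 t2 else k :: pvMisAux (k + 1) t1 t2
  | _, _, _ => []

def pvMis (l1 l2 : List Char) : List Nat := pvMisAux 0 l1 l2

def pvMisZ : Int → List (Char × Char) → List Int
  | _, [] => []
  | j, x :: t => if x.1 ≠ x.2 then j :: pvMisZ (j + 1) t else pvMisZ (j + 1) t

def pvDeltas : Option Int → List Int → List Int
  | _, [] => []
  | none, i :: t => i :: pvDeltas (some i) t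
  | some p, i :: t => (i - p) :: pvDeltas (some i) t

theorem pvDiffs_eq (z : List (Char × Char)) : ∀ (j : Int),
    ((PySem.List.enumerate z j).filter (fun p => p.2.1 ≠ p.2.2)).map Prod.fst = pvMisZ j z := by
  induction z with
  | nil => intro j; simp [PySem.List.enumerate_nil, pvMisZ]
  | cons x t ih =>
    intro j
    rw [PySem.List.enumerate_cons, List.filter_cons]
    by_cases hx : x.1 ≠ x.2
    · rw [if_pos (by simpa using hx), List.map_cons, ih (j + 1)]
      simp [pvMisZ, hx]
    · rw [if_neg (by simpa using hx), ih (j + 1)]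
      simp [pvMisZ, hx]

theorem pvPhase1_eq (z : List (Char × Char)) : ∀ (j : Int) (p : Option Int),
    ((PySem.List.enumerate z j).foldl pvStepB1 (p, [])).2 = pvDeltas p (pvMisZ j z) := by
  induction z with
  | nil => intro j p; simp [PySem.List.enumerate_nil, pvMisZ, pvDeltas]
  | cons x t ih =>
    intro j p
    rw [PySem.List.enumerate_cons, List.foldl_cons]
    by_cases hx : x.1 ≠ x.2
    · cases p with
      | none =>
        have hB : pvStepB1 (none, ([] : List Int)) (j, x) = (some j, [j]) := by
          simp [pvStepB1, hx]
        rw [hB]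
        obtain ⟨hacc, -⟩ := pvB1_acc (PySem.List.enumerate t (j + 1)) (some j) [j]
        rw [hacc, ih (j + 1) (some j)]
        simp [pvMisZ, hx, pvDeltas]
      | some q =>
        have hB : pvStepB1 (some q, ([] : List Int)) (j, x) = (some j, [j - q]) := by
          simp [pvStepB1, hx]
        rw [hB]
        obtain ⟨hacc, -⟩ := pvB1_acc (PySem.List.enumerate t (j + 1)) (some j) [j - q]
        rw [hacc, ih (j + 1) (some j)]
        simp [pvMisZ, hx, pvDeltas]
    · have hB : pvStepB1 (p, []) (j, x) = (p, []) := by simp [pvStepB1, hx]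
      rw [hB, ih (j + 1) p]
      simp [pvMisZ, hx]

theorem pvMisAux_shift (l1 : List Char) : ∀ (l2 : List Char) (k : Nat),
    pvMisAux k l1 l2 = (pvMisAux 0 l1 l2).map (fun i : Nat => i + k) := by
  induction l1 with
  | nil => intro l2 k; simp [pvMisAux]
  | cons a t1 ih =>
    intro l2 k
    cases l2 with
    | nil => simp [pvMisAux]
    | cons b t2 =>
      simp only [pvMisAux]
      by_cases hab : a = b
      · rw [if_pos hab, if_pos hab, ih t2 (k + 1), ih t2 1, List.map_map]
        apply List.map_congr_left
        intro i _
        simp only [Function.comp_apply]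
        omega
      · rw [if_neg hab, if_neg hab, ih t2 (k + 1), ih t2 1, List.map_cons, List.map_map]
        congr 1
        · omega
        · apply List.map_congr_left
          intro i _
          simp only [Function.comp_apply]
          omega

theorem pvMis_cons (a b : Char) (t1 t2 : List Char) :
    pvMis (a :: t1) (b :: t2) = (if a = b then (pvMis t1 t2).map (fun i : Nat => i + 1)
      else 0 :: (pvMis t1 t2).map (fun i : Nat => i + 1)) := by
  unfold pvMis
  simp only [pvMisAux]
  rw [pvMisAux_shift t1 t2 1]

theorem pvMisZ_zip (l1 : List Char) : ∀ (l2 : List Char) (j : Int),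
    pvMisZ j (l1.zip l2) = (pvMis l1 l2).map (fun i : Nat => (i : Int) + j) := by
  induction l1 with
  | nil => intro l2 j; simp [pvMis, pvMisAux, pvMisZ]
  | cons a t1 ih =>
    intro l2 j
    cases l2 with
    | nil => simp [pvMis, pvMisAux, pvMisZ]
    | cons b t2 =>
      have hmap : ∀ X : List Nat, (X.map (fun i : Nat => i + 1)).map (fun i : Nat => (i : Int) + j)
          = X.map (fun i : Nat => (i : Int) + (j + 1)) := by
        intro X
        rw [List.map_map]
        apply List.map_congr_left
        intro i _
        simp only [Function.comp_apply]
        push_cast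
        ring
      rw [List.zip_cons_cons]
      by_cases hab : a = b
      · rw [show pvMisZ j ((a, b) :: t1.zip t2) = pvMisZ (j + 1) (t1.zip t2) by
          simp [pvMisZ, hab]]
        rw [show pvMis (a :: t1) (b :: t2) = (pvMis t1 t2).map (fun i : Nat => i + 1) by
          rw [pvMis_cons, if_pos hab]]
        rw [hmap, ih t2 (j + 1)]
      · rw [show pvMisZ j ((a, b) :: t1.zip t2) = j :: pvMisZ (j + 1) (t1.zip t2) by
          simp [pvMisZ, hab]]
        rw [show pvMis (a :: t1) (b :: t2) = 0 :: (pvMis t1 t2).map (fun i : Nat => i + 1) by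
          rw [pvMis_cons, if_neg hab]]
        rw [List.map_cons, hmap, ih t2 (j + 1)]
        simp

theorem pvMisZ_zip0 (l1 l2 : List Char) :
    pvMisZ 0 (l1.zip l2) = (pvMis l1 l2).map (fun i : Nat => (i : Int)) := by
  rw [pvMisZ_zip]
  apply List.map_congr_left
  intro i _
  simp

theorem pvMis_mem (l1 : List Char) : ∀ (l2 : List Char) (i : Nat), i ∈ pvMis l1 l2 →
    i < l1.length ∧ i < l2.length := by
  induction l1 with
  | nil => intro l2 i h; simp [pvMis, pvMisAux] at h
  | cons a t1 ih =>
    intro l2 i h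
    cases l2 with
    | nil => simp [pvMis, pvMisAux] at h
    | cons b t2 =>
      rw [pvMis_cons] at h
      split_ifs at h with hab
      · rcases List.mem_map.mp h with ⟨k, hk, rfl⟩
        have := ih t2 k hk
        simp
        omega
      · rcases List.mem_cons.mp h with rfl | h
        · simp
        · rcases List.mem_map.mp h with ⟨k, hk, rfl⟩
          have := ih t2 k hk
          simp
          omega

theorem pvMis_pairwise (l1 : List Char) : ∀ (l2 : List Char),
    (pvMis l1 l2).Pairwise (· < ·) := by
  induction l1 with
  | nil => intro l2; simp [pvMis, pvMisAux]
  | cons a t1 ih =>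
    intro l2
    cases l2 with
    | nil => simp [pvMis, pvMisAux]
    | cons b t2 =>
      rw [pvMis_cons]
      have hmap : ((pvMis t1 t2).map (fun i : Nat => i + 1)).Pairwise (· < ·) := by
        rw [List.pairwise_map]
        exact (ih t2).imp (by omega)
      split_ifs with hab
      · exact hmap
      · refine List.Pairwise.cons ?_ hmap
        intro x hx
        rcases List.mem_map.mp hx with ⟨k, _, rfl⟩
        omega

theorem pvMis3_take (l1 : List Char) : ∀ (l2 : List Char) (k f : Nat),
    pvMis3 k f l1 l2 = (pvMisAux k l1 l2).take f := by
  induction l1 with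
  | nil => intro l2 k f; cases f <;> cases l2 <;> simp [pvMis3, pvMisAux]
  | cons a t1 ih =>
    intro l2 k f
    cases l2 with
    | nil => cases f <;> simp [pvMis3, pvMisAux]
    | cons b t2 =>
      cases f with
      | zero => simp [pvMis3]
      | succ g =>
        by_cases hab : a = b
        · simp only [pvMis3, pvMisAux, if_pos hab]
          exact ih t2 (k + 1) (g + 1)
        · simp only [pvMis3, pvMisAux, if_neg hab, List.take_succ_cons]
          rw [ih t2 (k + 1) g]

theorem pvD_iff (s1 s2 : String) :
    D_first_difference s1 s2 ↔
      ((pvMis s1.toList s2.toList = [] ∧ s1.toList.count '1' = 1)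
      ∨ ((pvMis s1.toList s2.toList).length = 1 ∧
          1 ≤ (s1.toList.eraseIdx ((pvMis s1.toList s2.toList).headD 0)).count '1')
      ∨ (2 ≤ s1.toList.length ∧
          pvMis s1.toList s2.toList = [0, s1.toList.length - 1] ∧
          (s1.toList.drop 1).count '1' = 0)) := by
  unfold D_first_difference
  rw [show pvMis3 0 3 s1.toList s2.toList = (pvMis s1.toList s2.toList).take 3 from
    pvMis3_take s1.toList s2.toList 0 3]
  rcases hN : pvMis s1.toList s2.toList with _ | ⟨i, _ | ⟨j, _ | ⟨m, rest⟩⟩⟩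
  · simp
  · simp
  · have hij : i < j := by
      have h := pvMis_pairwise s1.toList s2.toList
      rw [hN] at h
      exact (List.pairwise_cons.mp h).1 j (by simp)
    have hjl : j < s1.toList.length := (pvMis_mem s1.toList s2.toList j (by rw [hN]; simp)).1
    constructor
    · rintro (⟨h, -⟩ | ⟨h, -⟩ | ⟨-, h0, hdrop, hc⟩)
      · exact absurd h (by simp [List.take])
      · exact absurd h (by simp [List.take])
      · have h0' : i = 0 := by simpa [List.take] using h0
        have hj : j = s1.toList.length - 1 := by
          have := List.drop_eq_nil_iff.mp (by simpa [List.take] using hdrop)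
          omega
        exact Or.inr (Or.inr ⟨by omega, by rw [h0', hj], hc⟩)
    · rintro (⟨h, -⟩ | ⟨h, -⟩ | ⟨-, heq, hc⟩)
      · exact absurd h (by simp)
      · exact absurd h (by simp)
      · have h0 : i = 0 ∧ j = s1.toList.length - 1 := by simpa using heq
        refine Or.inr (Or.inr ⟨?_, ?_, ?_, hc⟩)
        · simp [List.take]
        · simpa [List.take] using h0.1
        · simp only [List.take, List.getD_cons_succ, List.getD_cons_zero]
          rw [List.drop_eq_nil_iff]
          omega
  · simp [List.take]

theorem pvB2_m_le (ds : List Int) : ∀ (c : List Char) (m : Nat),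
    m ≤ (ds.foldl pvStepB2 (c, m)).2 := by
  induction ds with
  | nil => intro c m; simp
  | cons d t ih =>
    intro c m
    rw [List.foldl_cons]
    unfold pvStepB2
    split_ifs
    · exact le_trans (Nat.le_succ m) (ih _ _)
    · exact ih c m

theorem pvRef_eq (s1 s2 : String) :
    pvRef s1 s2 =
      (let res := (pvDeltas none ((pvMis s1.toList s2.toList).map (fun i : Nat => (i : Int)))).foldl
        pvStepB2 (s1.toList, 0)
       if res.1.count '1' + res.2 = 1 then
         some (String.ofList (res.1.filter (fun c => c ≠ '1')))
       else none) := by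
  unfold pvRef
  dsimp only
  rw [pvPhase1_eq, pvMisZ_zip0]

theorem pvAlt_eq (s1 s2 : String) :
    first_difference_alt s1 s2 =
      (let M := (pvMis s1.toList s2.toList).map (fun i : Nat => (i : Int))
       if M.length = 1 then
         some (String.ofList (PySem.List.slice s1.toList none (some (M.headD 0)) ++
           PySem.List.slice s1.toList (some (M.headD 0 + 1)) none))
       else none) := by
  unfold first_difference_alt
  dsimp only
  rw [pvDiffs_eq, pvMisZ_zip0]

-- ===== VERDICT (by name: the statement is the Claim_ definition above) =====
theorem first_difference_spec : Claim_unchanged_first_difference := by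
  intro s1 s2 _ hD
  show first_difference s1 s2 = first_difference_alt s1 s2
  rw [pvD_iff] at hD
  push_neg at hD
  rw [pvA_eq_ref, pvRef_eq, pvAlt_eq]
  obtain ⟨hD1, hD2, hD3⟩ := hD
  rcases hN : pvMis s1.toList s2.toList with _ | ⟨i1, _ | ⟨i2, rest⟩⟩
  · -- no mismatch
    have hc : s1.toList.count '1' ≠ 1 := hD1 hN
    simp [pvDeltas, hc]
  · -- exactly one mismatch
    rw [hN] at hD2
    have hc : (s1.toList.eraseIdx i1).count '1' = 0 := by
      have := hD2 (by simp)
      simp at this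
      omega
    have hi1 : i1 < s1.toList.length := (pvMis_mem s1.toList s2.toList i1 (by rw [hN]; simp)).1
    have hstep : pvStepB2 (s1.toList, 0) (i1 : Int) = (s1.toList.eraseIdx i1, 1) := by
      unfold pvStepB2
      rw [if_pos (by exact_mod_cast hi1)]
      simp
    simp only [List.map_cons, List.map_nil, pvDeltas, List.foldl_cons, List.foldl_nil, hstep]
    rw [if_pos (by simp [hc])]
    rw [if_pos (by simp)]
    have hfil : (s1.toList.eraseIdx i1).filter (fun c => c ≠ '1') = s1.toList.eraseIdx i1 := by
      apply List.filter_eq_self.mpr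
      intro a ha
      have : a ≠ '1' := by
        intro h
        subst h
        exact absurd (List.count_pos_iff.mpr ha) (by omega)
      simpa using this
    rw [hfil]
    have h0 : (0 : Int) ≤ (i1 : Int) := by positivity
    rw [List.headD_cons, PySem.List.slice_to _ h0, PySem.List.slice_from _ (by omega)]
    rw [show ((i1 : Int)).toNat = i1 by omega, show ((i1 : Int) + 1).toNat = i1 + 1 by omega]
    rw [← List.eraseIdx_eq_take_drop_succ]
  · -- two or more mismatches: B returns none; show A's reference form is none too
    simp only [List.map_cons]
    rw [if_neg (show ¬((((i1 : Nat) : Int) :: ((i2 : Nat) : Int) ::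
      List.map (fun i : Nat => (i : Int)) rest).length = 1) by simp)]
    have hi1m : i1 ∈ pvMis s1.toList s2.toList := by rw [hN]; simp
    have hi2m : i2 ∈ pvMis s1.toList s2.toList := by rw [hN]; simp
    have hi1 : i1 < s1.toList.length := (pvMis_mem s1.toList s2.toList i1 hi1m).1
    have hi2 : i2 < s1.toList.length := (pvMis_mem s1.toList s2.toList i2 hi2m).1
    have hpw := pvMis_pairwise s1.toList s2.toList
    rw [hN] at hpw
    have h12 : i1 < i2 := by
      have := List.pairwise_cons.mp hpw
      exact this.1 i2 (by simp)
    have hstep1 : pvStepB2 (s1.toList, 0) (i1 : Int) = (s1.toList.eraseIdx i1, 1) := by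
      unfold pvStepB2
      rw [if_pos (by exact_mod_cast hi1)]
      simp
    have hlen1 : (s1.toList.eraseIdx i1).length = s1.toList.length - 1 := by
      rw [List.length_eraseIdx, if_pos hi1]
    simp only [List.map_cons, pvDeltas, List.foldl_cons, hstep1]
    by_cases hpop : ((i2 : Int) - (i1 : Int)) < ((s1.toList.eraseIdx i1).length : Int)
    · -- second deletion hits the core: marker count reaches 2 and never decreases
      have hstep2 : pvStepB2 (s1.toList.eraseIdx i1, 1) ((i2 : Int) - (i1 : Int))
          = ((s1.toList.eraseIdx i1).eraseIdx ((i2 : Int) - (i1 : Int)).toNat, 2) := by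
        unfold pvStepB2
        rw [if_pos hpop]
      rw [hstep2]
      have hm := pvB2_m_le (pvDeltas (some (i2 : Int)) (rest.map (fun i : Nat => (i : Int))))
        ((s1.toList.eraseIdx i1).eraseIdx ((i2 : Int) - (i1 : Int)).toNat) 2
      rw [if_neg (by omega)]
    · -- second deletion lands on the marker: forced shape i1 = 0, i2 = len-1, rest = []
      rw [hlen1] at hpop
      have hl : 2 ≤ s1.toList.length := by omega
      have h10 : i1 = 0 := by omega
      have h2l : i2 = s1.toList.length - 1 := by omega
      have hrest : rest = [] := by
        rcases rest with _ | ⟨r, rs⟩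
        · rfl
        · exfalso
          have hr2 : i2 < r := by
            have := List.pairwise_cons.mp (List.pairwise_cons.mp hpw).2
            exact this.1 r (by simp)
          have hrlen : r < s1.toList.length :=
            (pvMis_mem s1.toList s2.toList r (by rw [hN]; simp)).1
          omega
      subst hrest h10
      have hstep2 : pvStepB2 (s1.toList.eraseIdx 0, 1) ((i2 : Int) - ((0 : Nat) : Int))
          = (s1.toList.eraseIdx 0, 1) := by
        unfold pvStepB2
        rw [if_neg (by rw [hlen1]; omega)]
      simp only [List.map_nil, pvDeltas, List.foldl_cons, List.foldl_nil, hstep2]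
      have hdrop : s1.toList.eraseIdx 0 = s1.toList.drop 1 := by
        rw [List.eraseIdx_zero, ← List.drop_one]
      have hcnt : (s1.toList.drop 1).count '1' ≠ 0 := by
        intro hc
        exact absurd hc (hD3 hl (by rw [hN, h2l]))
      rw [if_neg (by rw [hdrop]; omega)]

theorem first_difference_changed : Claim_changed_first_difference := by
  unfold Claim_changed_first_difference
  decide

theorem first_difference_tight : Claim_exact_first_difference := by
  intro s1 s2 _ hD
  rw [pvA_eq_ref, pvRef_eq, pvAlt_eq]
  rw [pvD_iff] at hD
  rcases hD with ⟨hN, hc⟩ | ⟨hlen, hc⟩ | ⟨hl, hN, hc⟩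
  · -- no mismatch but one literal '1': A returns a stripped string, B none
    rw [hN]
    simp [pvDeltas, hc]
  · -- one mismatch, another '1' present: A returns none, B a string
    rcases hN : pvMis s1.toList s2.toList with _ | ⟨i1, _ | ⟨i2, rest⟩⟩ <;> rw [hN] at hlen <;>
      simp at hlen
    rw [hN] at hc
    simp only [List.headD_cons] at hc
    have hi1 : i1 < s1.toList.length := (pvMis_mem s1.toList s2.toList i1 (by rw [hN]; simp)).1
    have hstep : pvStepB2 (s1.toList, 0) (i1 : Int) = (s1.toList.eraseIdx i1, 1) := by
      unfold pvStepB2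
      rw [if_pos (by exact_mod_cast hi1)]
      simp
    simp only [List.map_cons, List.map_nil, pvDeltas, List.foldl_cons, List.foldl_nil, hstep]
    rw [if_neg (show ¬((s1.toList.eraseIdx i1).count '1' + 1 = 1) by omega)]
    rw [if_pos (show ([((i1 : Nat) : Int)].length = 1) by simp)]
    simp
  · -- mismatches exactly at 0 and len-1, no '1' in the tail: A returns str1[1:], B none
    rw [hN]
    have hstep1 : pvStepB2 (s1.toList, 0) ((0 : Nat) : Int) = (s1.toList.eraseIdx 0, 1) := by
      unfold pvStepB2
      rw [if_pos (show (((0 : Nat) : Int)) < (s1.toList.length : Int) by omega)]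
      simp
    have hlen1 : (s1.toList.eraseIdx 0).length = s1.toList.length - 1 := by
      rw [List.length_eraseIdx, if_pos (by omega)]
    have hstep2 : pvStepB2 (s1.toList.eraseIdx 0, 1)
        (((s1.toList.length - 1 : Nat) : Int) - ((0 : Nat) : Int))
        = (s1.toList.eraseIdx 0, 1) := by
      unfold pvStepB2
      rw [if_neg (by rw [hlen1]; omega)]
    simp only [List.map_cons, List.map_nil, pvDeltas, List.foldl_cons, List.foldl_nil,
      hstep1, hstep2]
    have hdrop : s1.toList.eraseIdx 0 = s1.toList.drop 1 := by
      rw [List.eraseIdx_zero, ← List.drop_one]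
    rw [if_pos (show (s1.toList.eraseIdx 0).count '1' + 1 = 1 by rw [hdrop]; omega)]
    rw [if_neg (show ¬(([((0 : Nat) : Int), ((s1.toList.length - 1 : Nat) : Int)]).length = 1)
      by simp)]
    simp
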